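-- pv_equiv track=rewrite | github.com/szarki9/BachelorMathematics-projects | CombinatoricalNumberTheory.py | num_of_coloured
-- ===== SOURCE A (Python) =====
-- def num_of_coloured(series, current_series, color):
--     color_series = []
--     for k in range(len(series)):
--         index = [(i, el.index(series[k])) for i, el in enumerate(current_series) if series[k] in el]
--         index = index[0][0]
--         if current_series[index][1] == color:
--             color_series.append(series[k])
--     return len(color_series)
-- ===== SOURCE B (Python) =====
-- def num_of_coloured(series, current_series, color):
--     # distinct values of series, first-occurrence order
--     pending = []
--     for v in series:
--         if v not in pending:
--             pending.append(v)
--     total = 0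
--     # single sweep over the rows: the row that first contains v decides v's color
--     for row in current_series:
--         found = [v for v in pending if v in row]
--         if found and row[1] == color:
--             for v in found:
--                 total += series.count(v)
--         pending = [v for v in pending if v not in found]
--     return total
-- ===== Notes on version B (the rewrite author's own statement) =====
-- stated objective: faster
-- what changed: Instead of rescanning all rows (with enumerate/index) once per series item, B dedups the series once and makes a single forward sweep over the rows, resolving each distinct value at its first containing row and adding its multiplicity when that row's second entry matches the color.
import Mathlib
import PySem

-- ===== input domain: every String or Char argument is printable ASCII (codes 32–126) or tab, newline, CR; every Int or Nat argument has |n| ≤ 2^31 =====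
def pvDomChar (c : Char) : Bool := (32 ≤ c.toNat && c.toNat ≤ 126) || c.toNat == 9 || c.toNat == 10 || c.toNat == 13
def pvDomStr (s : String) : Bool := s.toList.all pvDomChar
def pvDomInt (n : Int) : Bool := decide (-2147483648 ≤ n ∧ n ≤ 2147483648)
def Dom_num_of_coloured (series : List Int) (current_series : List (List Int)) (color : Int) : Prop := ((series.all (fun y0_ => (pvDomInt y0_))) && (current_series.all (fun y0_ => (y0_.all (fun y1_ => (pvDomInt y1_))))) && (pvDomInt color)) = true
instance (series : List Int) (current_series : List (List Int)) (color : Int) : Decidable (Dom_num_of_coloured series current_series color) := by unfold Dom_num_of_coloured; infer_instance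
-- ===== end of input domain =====

-- B replaces A's per-item scan of all rows by a dedup pass plus one forward sweep over the
-- rows that resolves each distinct value at its first containing row (alternative decomposition).


-- ===== PORT A =====
def num_of_coloured (series : List Int) (current_series : List (List Int)) (color : Int) : Int :=
  let color_series :=
    (PySem.List.pyRange 0 (series.length : Int) 1).foldl (fun color_series k =>
      let sk := PySem.List.pyGetD series k 0
      let index1 := ((PySem.List.enumerate current_series).filter (fun p => p.2.contains sk)).map
          (fun p => (p.1, ((PySem.List.index? p.2 sk).getD 0 : Int)))
      let index := (PySem.List.pyGetD index1 0 ((0 : Int), (0 : Int))).1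
      if PySem.List.pyGetD (PySem.List.pyGetD current_series index []) 1 0 == color
      then color_series ++ [sk] else color_series) []
  (color_series.length : Int)

-- ===== PORT B =====
-- 'for v in series: if v not in pending: pending.append(v)'
def pendingOf (series : List Int) : List Int :=
  series.foldl (fun acc v => if acc.contains v then acc else acc ++ [v]) []

-- the body of B's 'for row in current_series' loop; state = (pending, total)
def sweepStep (series : List Int) (color : Int) (st : List Int × Int) (row : List Int) : List Int × Int :=
  let found := st.1.filter (fun v => row.contains v)
  let total := if !found.isEmpty && (PySem.List.pyGetD row 1 0 == color)
               then found.foldl (fun t v => t + (series.count v : Int)) st.2 else st.2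
  (st.1.filter (fun v => !found.contains v), total)

def num_of_coloured_alt (series : List Int) (current_series : List (List Int)) (color : Int) : Int :=
  (current_series.foldl (sweepStep series color) (pendingOf series, (0 : Int))).2

-- ===== PRECONDITION & SPEC =====
-- Pre_ excludes exactly the inputs where the Python A raises IndexError: some series value
-- contained in no row, or whose first containing row has fewer than two elements.
def Pre_num_of_coloured (series : List Int) (current_series : List (List Int)) (color : Int) : Prop :=
  ∀ v ∈ series, ((current_series.find? (fun row => row.contains v)).any (fun r => 2 ≤ r.length)) = true
instance (series : List Int) (current_series : List (List Int)) (color : Int) : Decidable (Pre_num_of_coloured series current_series color) := by unfold Pre_num_of_coloured; infer_instance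
def pvWitness_num_of_coloured : List Int × List (List Int) × Int := ([1, 2, 1], [[3, 5], [1, 7, 2]], 7)
def Spec_num_of_coloured (series : List Int) (current_series : List (List Int)) (color : Int) (out : Int) : Prop := out = num_of_coloured_alt series current_series color
instance (series : List Int) (current_series : List (List Int)) (color : Int) (out : Int) : Decidable (Spec_num_of_coloured series current_series color out) := by unfold Spec_num_of_coloured; infer_instance

-- ===== CLAIM (what is proved, stated in full; the proofs are below) =====
def Claim_equal_num_of_coloured : Prop := ∀ (series : List Int) (current_series : List (List Int)) (color : Int), Dom_num_of_coloured series current_series color → Pre_num_of_coloured series current_series color → Spec_num_of_coloured series current_series color (num_of_coloured series current_series color)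

-- ===== LEMMAS AND PROOFS =====

-- the color decision for a value v: the second entry of the first row containing v
def goodB (cs : List (List Int)) (color : Int) (v : Int) : Bool :=
  (cs.find? (fun row => row.contains v)).any (fun r => PySem.List.pyGetD r 1 0 == color)

theorem firstHit (cs : List (List Int)) (v : Int) (r : List Int)
    (h : cs.find? (fun row => row.contains v) = some r) : ∀ (s : Int),
    ∃ i : Nat, ((PySem.List.enumerate cs s).filter (fun p => p.2.contains v)).head? = some (s + (i : Int), r)
      ∧ cs[i]? = some r := by
  induction cs with
  | nil => simp at h
  | cons c cs ih =>
    intro s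
    rw [List.find?_cons] at h
    by_cases hc : c.contains v
    · simp only [hc, cond_true, Option.some.injEq] at h
      refine ⟨0, ?_, by simp [h]⟩
      rw [PySem.List.enumerate_cons, List.filter_cons, if_pos (by simpa using hc)]
      simp [h]
    · simp only [hc, cond_false] at h
      obtain ⟨i, h1, h2⟩ := ih h (s + 1)
      refine ⟨i + 1, ?_, by simpa using h2⟩
      rw [PySem.List.enumerate_cons, List.filter_cons, if_neg (by simpa using hc), h1]
      have : s + 1 + (i : Int) = s + ((i : Int) + 1) := by ring
      rw [this]
      push_cast
      ring_nf

theorem pending_mem (series : List Int) : ∀ (acc : List Int) (v : Int),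
    v ∈ series.foldl (fun acc v => if acc.contains v then acc else acc ++ [v]) acc ↔ v ∈ acc ∨ v ∈ series := by
  induction series with
  | nil => simp
  | cons a s ih =>
    intro acc v
    simp only [List.foldl_cons]
    by_cases ha : acc.contains a
    · rw [if_pos ha, ih]
      simp only [List.contains_eq_mem, decide_eq_true_eq] at ha
      simp only [List.mem_cons]
      constructor
      · rintro (h | h)
        · exact Or.inl h
        · exact Or.inr (Or.inr h)
      · rintro (h | h | h)
        · exact Or.inl h
        · subst h; exact Or.inl ha
        · exact Or.inr h
    · rw [if_neg ha, ih]
      simp only [List.mem_append, List.mem_singleton, List.mem_cons]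
      tauto

theorem pending_nodup (series : List Int) : ∀ (acc : List Int), acc.Nodup →
    (series.foldl (fun acc v => if acc.contains v then acc else acc ++ [v]) acc).Nodup := by
  induction series with
  | nil => intro acc h; simpa
  | cons a s ih =>
    intro acc h
    simp only [List.foldl_cons]
    by_cases ha : acc.contains a
    · rw [if_pos ha]; exact ih acc h
    · rw [if_neg ha]
      refine ih _ ?_
      simp only [List.contains_eq_mem, decide_eq_true_eq] at ha
      exact h.append (List.nodup_singleton a) (by simpa [List.disjoint_singleton] using ha)

theorem sum_filter_partition (f : Int → Int) (q : Int → Bool) : ∀ (l : List Int),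
    (l.map f).sum = ((l.filter q).map f).sum + ((l.filter (fun v => !q v)).map f).sum := by
  intro l
  induction l with
  | nil => simp
  | cons a l ih =>
    by_cases hq : q a <;> simp [hq, ih] <;> ring

theorem sum_map_congr (l : List Int) (f g : Int → Int) (h : ∀ v ∈ l, f v = g v) :
    (l.map f).sum = (l.map g).sum := by
  rw [List.map_congr_left h]

theorem goodB_cons (r : List Int) (cs : List (List Int)) (color v : Int) :
    goodB (r :: cs) color v =
      cond (r.contains v) (PySem.List.pyGetD r 1 0 == color) (goodB cs color v) := by
  unfold goodB
  by_cases h : v ∈ r <;> simp [List.find?_cons, h]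

theorem sweepStep_eq (series : List Int) (color : Int) (P : List Int) (t : Int) (row : List Int) :
    sweepStep series color (P, t) row =
      (P.filter (fun v => !(P.filter (fun v => row.contains v)).contains v),
       if !(P.filter (fun v => row.contains v)).isEmpty && (PySem.List.pyGetD row 1 0 == color)
       then t + ((P.filter (fun v => row.contains v)).map (fun v => (series.count v : Int))).sum
       else t) := by
  simp only [sweepStep]
  rw [PySem.List.foldl_add]

theorem ite_sum_arith (e rm : Bool) (t S1 S2 : Int) (hE : e = true → S1 = 0) :
    (if (!e && rm) = true then t + S1 else t) + S2
      = t + ((if rm = true then S1 else 0) + S2) := by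
  cases e <;> cases rm <;> simp_all <;> ring

theorem B_loop (series : List Int) (color : Int) : ∀ (cs : List (List Int)) (P : List Int) (t : Int),
    P.Nodup →
    (cs.foldl (sweepStep series color) (P, t)).2
      = t + (P.map (fun v => if goodB cs color v then (series.count v : Int) else 0)).sum := by
  intro cs
  induction cs with
  | nil =>
    intro P t _
    simp [goodB]
  | cons r cs ih =>
    intro P t hP
    have hfilt : (P.filter (fun v => !(P.filter (fun v => r.contains v)).contains v))
        = P.filter (fun v => !r.contains v) := by
      apply List.filter_congr
      intro v hv
      by_cases hr : v ∈ r <;> simp [List.mem_filter, hv, hr]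
    rw [List.foldl_cons, sweepStep_eq, hfilt, ih _ _ (hP.filter _)]
    have hsplit := sum_filter_partition
      (fun v => if goodB (r :: cs) color v then (series.count v : Int) else 0)
      (fun v => r.contains v) P
    have h1 : ((P.filter (fun v => r.contains v)).map
          (fun v => if goodB (r :: cs) color v then (series.count v : Int) else 0)).sum
        = if (PySem.List.pyGetD r 1 0 == color)
          then ((P.filter (fun v => r.contains v)).map (fun v => (series.count v : Int))).sum else 0 := by
    
      rw [sum_map_congr _ _ (fun v => if (PySem.List.pyGetD r 1 0 == color) then (series.count v : Int) else 0)
        (by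
          intro v hv
          have hvr : v ∈ r := by
            rw [List.mem_filter] at hv
            simpa using hv.2
          rw [goodB_cons]
          simp [hvr])]
      by_cases hb : (PySem.List.pyGetD r 1 0 == color) = true <;> simp [hb]
    have h2 : ((P.filter (fun v => !r.contains v)).map
          (fun v => if goodB (r :: cs) color v then (series.count v : Int) else 0)).sum
        = ((P.filter (fun v => !r.contains v)).map
          (fun v => if goodB cs color v then (series.count v : Int) else 0)).sum := by
      apply sum_map_congr
      intro v hv
      have hvr : v ∉ r := by
        rw [List.mem_filter] at hv
        simpa using hv.2
      rw [goodB_cons]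
      simp [hvr]
    rw [h1, h2] at hsplit
    rw [hsplit]
    exact ite_sum_arith _ _ _ _ _ (fun hfe => by
      rw [List.isEmpty_iff.mp hfe]
      simp)

theorem countP_split (v : Int) (l' : List Int) (hv : v ∉ l') (p : Int → Bool) :
    ∀ series : List Int, ((series.countP (fun x => p x && ((x == v) || l'.contains x))) : Int)
      = (if p v then (series.count v : Int) else 0) + (series.countP (fun x => p x && l'.contains x) : Int) := by
  intro series
  induction series with
  | nil => simp
  | cons a s ih =>
    rw [List.countP_cons, List.countP_cons, List.count_cons]
    push_cast
    rw [ih]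
    by_cases hav : a = v
    · subst hav
      by_cases hp : p a <;> simp [hp, hv] <;> ring
    · have hne : (a == v) = false := by simp [hav]
      by_cases hp : p a <;> by_cases hl : a ∈ l' <;>
        simp [hp, hl, hne] <;> ring

theorem B_sum_eq (series : List Int) (p : Int → Bool) : ∀ (P : List Int), P.Nodup →
    (P.map (fun v => if p v then (series.count v : Int) else 0)).sum
      = (series.countP (fun x => p x && P.contains x) : Int) := by
  intro P
  induction P with
  | nil => simp
  | cons v l' ih =>
    intro hnd
    rcases List.nodup_cons.mp hnd with ⟨hv, hnd'⟩
    simp only [List.map_cons, List.sum_cons]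
    rw [ih hnd']
    have hc : (fun x => p x && (v :: l').contains x) = (fun x => p x && ((x == v) || l'.contains x)) := by
      funext x
      rw [List.contains_cons]
    rw [hc, countP_split v l' hv p series]

def condA (cs : List (List Int)) (color : Int) (sk : Int) : Bool :=
  PySem.List.pyGetD
    (PySem.List.pyGetD cs
      ((PySem.List.pyGetD
        (((PySem.List.enumerate cs).filter (fun p => p.2.contains sk)).map
          (fun p => (p.1, ((PySem.List.index? p.2 sk).getD 0 : Int))))
        0 ((0 : Int), (0 : Int))).1) []) 1 0 == color

theorem condA_eq (cs : List (List Int)) (color v : Int) (r : List Int)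
    (hex : cs.find? (fun row => row.contains v) = some r) :
    condA cs color v = goodB cs color v := by
  obtain ⟨i, h1, h2⟩ := firstHit cs v r hex 0
  unfold condA goodB
  rw [hex]
  rw [PySem.List.pyGetD_zero]
  have h3 : (((PySem.List.enumerate cs).filter (fun p => p.2.contains v)).map
        (fun p => (p.1, ((PySem.List.index? p.2 v).getD 0 : Int)))).getD 0 ((0 : Int), (0 : Int))
      = ((0 : Int) + (i : Int), ((PySem.List.index? r v).getD 0 : Int)) := by
    rw [List.getD_eq_getElem?_getD, ← List.head?_eq_getElem?, List.head?_map, h1]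
    rfl
  rw [h3]
  have h4 : PySem.List.pyGetD cs ((0 : Int) + (i : Int)) [] = r := by
    have hz : (0 : Int) + (i : Int) = ((i : Nat) : Int) := by push_cast; ring
    rw [hz, PySem.List.pyGetD_natCast, List.getD_eq_getElem?_getD, h2]
    rfl
  show (PySem.List.pyGetD (PySem.List.pyGetD cs ((0 : Int) + (i : Int)) []) 1 0 == color) = _
  rw [h4]
  simp [Option.any_some]

theorem A_char (series : List Int) (cs : List (List Int)) (color : Int)
    (hpre : Pre_num_of_coloured series cs color) :
    num_of_coloured series cs color = (series.countP (goodB cs color) : Int) := by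
  unfold num_of_coloured
  change (((PySem.List.pyRange 0 (series.length : Int) 1).foldl
      (fun acc k => (fun acc sk => if condA cs color sk then acc ++ [sk] else acc) acc
        (PySem.List.pyGetD series k 0)) []).length : Int) = _
  rw [PySem.List.foldl_pyRange_zero_pyGetD' series 0
    (fun acc sk => if condA cs color sk then acc ++ [sk] else acc) []]
  rw [PySem.List.foldl_append_if_eq_filter]
  rw [List.countP_eq_length_filter]
  congr 2
  apply List.filter_congr
  intro v hv
  have h := hpre v hv
  rcases ho : cs.find? (fun row => row.contains v) with _ | r
  · rw [ho] at h; simp at h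
  · exact condA_eq cs color v r ho

theorem B_char (series : List Int) (cs : List (List Int)) (color : Int) :
    num_of_coloured_alt series cs color
      = (series.countP (fun x => goodB cs color x && (pendingOf series).contains x) : Int) := by
  unfold num_of_coloured_alt
  rw [B_loop series color cs (pendingOf series) 0 (pending_nodup series [] List.nodup_nil)]
  rw [B_sum_eq series (goodB cs color) (pendingOf series) (pending_nodup series [] List.nodup_nil)]
  ring

-- ===== VERDICT (by name: the statement is the Claim_ definition above) =====
theorem num_of_coloured_spec : Claim_equal_num_of_coloured := by
  intro series cs color _ hpre
  unfold Spec_num_of_coloured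
  rw [A_char series cs color hpre, B_char series cs color]
  congr 1
  apply List.countP_congr
  intro x hx
  have hm : x ∈ pendingOf series := (pending_mem series [] x).mpr (Or.inr hx)
  simp [hm]
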